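-- pv_equiv track=rewrite | github.com/emman27/leetcode | find_and_replace_pattern.py | str_to_values
-- ===== SOURCE A (Python) =====
-- from typing import Dict, List
--
-- def str_to_values(pattern: str) -> List[int]:
--     d: Dict[str, int] = {}
--     i = 0
--     values: List[int] = []
--     for char in pattern:
--         if char not in d:
--             d[char] = i
--             i += 1
--         values.append(d[char])
--     return values
-- ===== SOURCE B (Python) =====
-- def str_to_values(pattern):
--     # label of c = number of distinct characters strictly before c's first occurrence
--     return [len(set(pattern[:pattern.index(c)])) for c in pattern]
-- ===== Notes on version B (the rewrite author's own statement) =====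
-- stated objective: alternative
-- what changed: Drops the dict/counter machinery entirely: each label is computed independently as the number of distinct characters in the prefix before that character's first occurrence (set of a slice per character), trading the incremental single-pass table for a per-character brute-force characterisation.
import Mathlib
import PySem

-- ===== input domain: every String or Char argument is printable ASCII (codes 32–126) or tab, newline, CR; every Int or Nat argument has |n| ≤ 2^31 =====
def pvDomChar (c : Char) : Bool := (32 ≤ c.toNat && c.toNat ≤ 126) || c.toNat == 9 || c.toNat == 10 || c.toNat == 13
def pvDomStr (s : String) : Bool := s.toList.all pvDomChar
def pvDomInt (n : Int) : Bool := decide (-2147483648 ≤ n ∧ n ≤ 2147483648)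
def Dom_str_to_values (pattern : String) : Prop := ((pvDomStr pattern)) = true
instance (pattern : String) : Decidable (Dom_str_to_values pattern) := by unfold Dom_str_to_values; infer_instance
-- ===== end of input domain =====

-- B discards the dict entirely: each label is recomputed independently as the number of
-- distinct characters in the prefix before that character's first occurrence
-- (len(set(pattern[:pattern.index(c)]))); objective: alternative, O(n^2) vs A's O(n).


-- ===== PORT A =====
-- 'for char in pattern: if char not in d: d[char]=i; i+=1; values.append(d[char])'
def strToValuesLoop : List Char → PySem.Dict Char Int → Int → List Int → List Int
  | [], _, _, values => values
  | c :: rest, d, i, values =>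
    if d.contains c then
      strToValuesLoop rest d i (values ++ [(d.get? c).getD 0])
    else
      strToValuesLoop rest (d.insert c i) (i + 1)
        (values ++ [((d.insert c i).get? c).getD 0])

def str_to_values (pattern : String) : List Int :=
  strToValuesLoop pattern.toList PySem.Dict.empty 0 []

-- ===== PORT B =====
-- [len(set(pattern[:pattern.index(c)])) for c in pattern]
-- (pattern.index(c) never raises here since c is drawn from pattern; the none branch is unreachable)
def str_to_values_alt (pattern : String) : List Int :=
  pattern.toList.map (fun c =>
    match PySem.List.index? pattern.toList c with
    | some i => ((PySem.Set.ofList (PySem.List.slice pattern.toList none (some (i : Int)))).length : Int)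
    | none => 0)

-- ===== PRECONDITION & SPEC =====
def Spec_str_to_values (pattern : String) (out : List Int) : Prop := out = str_to_values_alt pattern
instance (pattern : String) (out : List Int) : Decidable (Spec_str_to_values pattern out) := by unfold Spec_str_to_values; infer_instance

-- ===== CLAIM (what is proved, stated in full; the proofs are below) =====
def Claim_equal_str_to_values : Prop := ∀ (pattern : String), Dom_str_to_values pattern → Spec_str_to_values pattern (str_to_values pattern)

-- ===== LEMMAS AND PROOFS =====

-- first-appearance labelling relative to the list u of distinct chars seen so far
def specLoop : List Char → List Char → List Int
  | [], _ => []
  | c :: rest, u =>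
    match PySem.List.index? u c with
    | some k => (k : Int) :: specLoop rest u
    | none => (u.length : Int) :: specLoop rest (u ++ [c])

-- A's loop follows specLoop, with d ~ u and i = u.length
lemma loopA_spec (rest : List Char) : ∀ (u : List Char) (d : PySem.Dict Char Int) (values : List Int),
    (∀ c, d.get? c = (PySem.List.index? u c).map (fun k => (k : Int))) →
    strToValuesLoop rest d (u.length : Int) values = values ++ specLoop rest u := by
  induction rest with
  | nil => intro u d values _; simp [strToValuesLoop, specLoop]
  | cons c rest ih =>
    intro u d values hd
    have hc : d.contains c = (PySem.List.index? u c).isSome := by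
      rw [PySem.Dict.contains_eq_isSome_get?, hd]; cases PySem.List.index? u c <;> rfl
    simp only [strToValuesLoop, specLoop]
    cases hk : PySem.List.index? u c with
    | some k =>
      rw [hc, hk]
      simp only [Option.isSome_some, if_true, hd c, hk]
      rw [ih u d _ hd]; simp
    | none =>
      have hcnot : c ∉ u := (PySem.List.index?_eq_none_iff _ _).mp hk
      rw [hc, hk]
      simp only [Option.isSome_none, Bool.false_eq_true, if_false,
        PySem.Dict.get?_insert_self, Option.getD_some]
      have hnext : ∀ c', (d.insert c (u.length : Int)).get? c' =
          (PySem.List.index? (u ++ [c]) c').map (fun k => (k : Int)) := by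
        intro c'
        by_cases h : c' = c
        · subst h
          rw [PySem.Dict.get?_insert_self, PySem.List.index?_append_singleton_self u _ hcnot]
          rfl
        · rw [PySem.Dict.get?_insert_of_ne d _ h, hd c']
          by_cases hm : c' ∈ u
          · rw [PySem.List.index?_append_of_mem [c] hm]
          · rw [(PySem.List.index?_eq_none_iff _ _).mpr hm,
              (PySem.List.index?_eq_none_iff _ _).mpr (by simp [hm, h])]
      have hlen : (u.length : Int) + 1 = ((u ++ [c]).length : Int) := by simp
      rw [hlen, ih (u ++ [c]) _ _ hnext]
      simp

-- specLoop relative to a seen-prefix u equals labelling by index in the full dedup D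
lemma spec_eq_map (rest : List Char) : ∀ (u D : List Char),
    u.Nodup → PySem.Set.update u rest = D →
    specLoop rest u = rest.map (fun c => ((PySem.List.index? D c).map (fun k => (k : Int))).getD 0) := by
  induction rest with
  | nil => intro u D _ _; simp [specLoop]
  | cons c rest ih =>
    intro u D hnd hupd
    rw [PySem.Set.update_cons] at hupd
    simp only [specLoop, List.map_cons]
    cases hk : PySem.List.index? u c with
    | some k =>
      have hcu : c ∈ u := (PySem.List.index?_isSome_iff _ _).mp (by rw [hk]; rfl)
      have hadd : PySem.Set.add u c = u := by simp [PySem.Set.add, PySem.Set.contains, hcu]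
      rw [hadd] at hupd
      have hD : PySem.List.index? D c = some k := by
        obtain ⟨t, ht⟩ : ∃ t, D = u ++ t := by
          rw [← hupd, PySem.Set.update_eq_append_filter]; exact ⟨_, rfl⟩
        rw [ht, PySem.List.index?_append_of_mem t hcu, hk]
      rw [hD, ih u D hnd hupd]
      rfl
    | none =>
      have hcu : c ∉ u := (PySem.List.index?_eq_none_iff _ _).mp hk
      have hadd : PySem.Set.add u c = u ++ [c] := by
        simp [PySem.Set.add, PySem.Set.contains, hcu]
      rw [hadd] at hupd
      have hnd' : (u ++ [c]).Nodup := by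
        rw [List.nodup_append]
        exact ⟨hnd, List.nodup_singleton c, fun a ha => by simp; exact fun h => hcu (h ▸ ha)⟩
      have hD : PySem.List.index? D c = some u.length := by
        obtain ⟨t, ht⟩ : ∃ t, D = (u ++ [c]) ++ t := by
          rw [← hupd, PySem.Set.update_eq_append_filter]; exact ⟨_, rfl⟩
        rw [ht, PySem.List.index?_append_of_mem t (by simp),
          PySem.List.index?_append_singleton_self u c hcu]
      rw [hD, ih (u ++ [c]) D hnd' hupd]
      rfl

-- the rank of c in the running dedup equals the number of distinct chars before c's first occurrence
lemma idx_update_take (l : List Char) : ∀ (u : List Char) (c : Char) (i : ℕ),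
    c ∉ u → PySem.List.index? l c = some i →
    PySem.List.index? (PySem.Set.update u l) c = some ((PySem.Set.update u (l.take i)).length) := by
  induction l with
  | nil => intro u c i _ h; simp [PySem.List.index?_eq_idxOf?] at h
  | cons x l ih =>
    intro u c i hcu hi
    by_cases hx : x = c
    · subst hx
      rw [PySem.List.index?_cons_self] at hi
      injection hi with hi; subst hi
      have hadd : PySem.Set.add u x = u ++ [x] := by
        simp [PySem.Set.add, PySem.Set.contains, hcu]
      have h1 : PySem.Set.update u (x :: l) =
          (u ++ [x]) ++ (PySem.Set.ofList l).filter (fun y => !(PySem.Set.contains (u ++ [x]) y)) := by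
        rw [PySem.Set.update_cons, hadd, PySem.Set.update_eq_append_filter]
      rw [h1, PySem.List.index?_append_of_mem _ (by simp : x ∈ u ++ [x]),
        PySem.List.index?_append_singleton_self u x hcu]
      simp [PySem.Set.update]
    · rw [PySem.List.index?_cons_of_ne l hx] at hi
      cases hj : PySem.List.index? l c with
      | none => rw [hj] at hi; simp at hi
      | some j =>
        rw [hj] at hi
        injection hi with hi
        subst hi
        simp only [List.take_succ_cons, PySem.Set.update_cons]
        have hcu' : c ∉ PySem.Set.add u x := by
          intro h
          rcases (PySem.Set.mem_add u x c).mp h with h | h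
          · exact hcu h
          · exact hx h.symm
        exact ih (PySem.Set.add u x) c j hcu' hj

-- ===== VERDICT (by name: the statement is the Claim_ definition above) =====
theorem str_to_values_spec : Claim_equal_str_to_values := by
  intro pattern _
  unfold Spec_str_to_values str_to_values str_to_values_alt
  have h0 : ∀ c, (PySem.Dict.empty : PySem.Dict Char Int).get? c =
      (PySem.List.index? ([] : List Char) c).map (fun k => (k : Int)) := by
    intro c; simp [PySem.List.index?]
  have hA := loopA_spec pattern.toList [] PySem.Dict.empty [] h0
  simp only [List.length_nil, Int.natCast_zero, List.nil_append] at hA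
  rw [hA]
  have hupd : PySem.Set.update [] pattern.toList = PySem.List.dedup pattern.toList := by
    rw [PySem.Set.update_nil_left, PySem.List.dedup_eq_ofList]
  rw [spec_eq_map pattern.toList [] _ List.nodup_nil hupd]
  apply List.map_congr_left
  intro c hc
  obtain ⟨i, hi⟩ : ∃ i, PySem.List.index? pattern.toList c = some i := by
    cases h : PySem.List.index? pattern.toList c with
    | none => exact absurd ((PySem.List.index?_eq_none_iff _ _).mp h) (not_not_intro hc)
    | some i => exact ⟨i, rfl⟩
  have hd := idx_update_take pattern.toList [] c i (by simp) hi
  rw [hupd] at hd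
  rw [hd, hi]
  simp [PySem.List.slice_to_natCast, PySem.Set.update_nil_left]
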